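-- pv_equiv track=rewrite | github.com/maxcohen31/Codewars-Solutions | Codewars/The_animals_went_in_two_by_two_7_kyu.py | two_by_two
-- ===== SOURCE A (Python) =====
-- from collections import Counter
--
-- def two_by_two(animals):
--     if animals == []:
--         return False
--     couples = Counter(animals)
--     for k,v in couples.items():
--         if v >= 3:
--             couples[k] = 2
--
--     return {k:v for k,v in couples.items() if v == 2}
-- ===== SOURCE B (Python) =====
-- def two_by_two(animals):
--     # Stateless: keep each first occurrence (index(a) == i) whose value occurs at least twice.
--     return {a: 2 for i, a in enumerate(animals) if animals.index(a) == i and animals.count(a) >= 2}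
-- ===== Notes on version B (the rewrite author's own statement) =====
-- stated objective: simpler
-- what changed: Replaces Counter-building, the count-capping mutation pass and the count==2 filter by one stateless comprehension over enumerate(animals) that keeps first occurrences (index(a)==i) occurring at least twice; no counter or mutable state is maintained.
-- outside the precondition, e.g. on two_by_two([]): A returns False, B returns {}
import Mathlib
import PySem

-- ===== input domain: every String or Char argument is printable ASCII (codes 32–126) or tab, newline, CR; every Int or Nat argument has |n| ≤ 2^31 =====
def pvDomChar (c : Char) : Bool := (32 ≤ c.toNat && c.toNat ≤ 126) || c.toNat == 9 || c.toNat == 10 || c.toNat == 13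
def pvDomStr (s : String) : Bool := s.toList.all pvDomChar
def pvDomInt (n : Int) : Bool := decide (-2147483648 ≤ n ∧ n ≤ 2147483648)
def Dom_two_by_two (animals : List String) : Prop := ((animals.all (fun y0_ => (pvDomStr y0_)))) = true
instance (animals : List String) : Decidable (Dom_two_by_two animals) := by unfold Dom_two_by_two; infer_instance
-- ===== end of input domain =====

-- B replaces Counter + capping pass + count==2 filter by one stateless comprehension over enumerate (first occurrence, count ≥ 2); equivalence is about the return value.

-- ===== PORT A =====
def two_by_two (animals : List String) : List (String × Int) :=
  if animals = [] then []   -- Python returns False here (not a dict value): excluded by Pre_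
  else
    let couples := PySem.Dict.counter animals
    let capped := couples.items.foldl
      (fun d kv => if 3 ≤ kv.2 then d.insert kv.1 2 else d) couples
    capped.items.filter (fun kv => kv.2 == 2)

-- ===== PORT B =====
-- the dict comprehension's keys are pairwise distinct (one per first occurrence), so its
-- item list is exactly this filtered-and-mapped list of enumerate(animals)
def two_by_two_alt (animals : List String) : List (String × Int) :=
  ((PySem.List.enumerate animals 0).filter
    (fun p => ((PySem.List.index? animals p.2).map (fun k => (k : Int)) == some p.1)
              && decide (2 ≤ animals.count p.2))).map
    (fun p => (p.2, (2 : Int)))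

-- ===== PRECONDITION & SPEC =====
-- Pre_ excludes only the empty list, on which A returns False, a bool instead of a dict of the declared return type.
def Pre_two_by_two (animals : List String) : Prop := animals ≠ []
instance (animals : List String) : Decidable (Pre_two_by_two animals) := by unfold Pre_two_by_two; infer_instance
def pvWitness_two_by_two : List String := ["cat", "dog", "dog"]

def Spec_two_by_two (animals : List String) (out : List (String × Int)) : Prop := out = two_by_two_alt animals
instance (animals : List String) (out : List (String × Int)) : Decidable (Spec_two_by_two animals out) := by unfold Spec_two_by_two; infer_instance

-- ===== CLAIM (what is proved, stated in full; the proofs are below) =====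
def Claim_equal_two_by_two : Prop := ∀ (animals : List String), Dom_two_by_two animals → Pre_two_by_two animals → Spec_two_by_two animals (two_by_two animals)

-- ===== LEMMAS AND PROOFS =====

-- The capping loop of A: folding overwrites of already-present keys maps the items pointwise.
theorem capFold_items (ps : List (String × Int)) (d : PySem.Dict String Int)
    (h : ∀ p ∈ ps, d.contains p.1 = true) :
    (ps.foldl (fun d kv => if 3 ≤ kv.2 then d.insert kv.1 2 else d) d).items =
      d.items.map (fun p => if ps.any (fun q => q.1 == p.1 && decide (3 ≤ q.2)) then (p.1, 2) else p) := by
  induction ps generalizing d with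
  | nil => simp
  | cons q ps ih =>
    by_cases hq : 3 ≤ q.2
    · have hc : d.contains q.1 = true := h q (by simp)
      have h' : ∀ p ∈ ps, (d.insert q.1 2).contains p.1 = true := by
        intro p hp
        simp [PySem.Dict.contains_insert, h p (List.mem_cons_of_mem _ hp)]
      rw [List.foldl_cons, if_pos hq, ih _ h',
        PySem.Dict.items_insert_of_contains d 2 hc, List.map_map]
      apply List.map_congr_left
      intro p _
      by_cases hpk : p.1 = q.1
      · simp only [Function.comp, hpk, beq_self_eq_true, if_pos, List.any_cons, hq,
          decide_true, Bool.and_true, Bool.true_or, ite_self]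
      · have h1 : (p.1 == q.1) = false := by simp [hpk]
        have h2 : (q.1 == p.1) = false := by simp [Ne.symm hpk]
        simp only [Function.comp, List.any_cons, h1, h2, Bool.false_eq_true, if_false,
          Bool.false_and, Bool.false_or]
    · rw [List.foldl_cons, if_neg hq, ih d (fun p hp => h p (List.mem_cons_of_mem _ hp))]
      apply List.map_congr_left
      intro p _
      have hd3 : decide (3 ≤ q.2) = false := by simp [hq]
      simp only [List.any_cons, hd3, Bool.and_false, Bool.false_or]

-- A computes: the distinct animals in first-occurrence order, kept iff they occur at least twice, paired with 2.
theorem two_by_two_char (animals : List String) (hne : animals ≠ []) :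
    two_by_two animals =
      ((PySem.Set.ofList animals).filter (fun k => decide (2 ≤ animals.count k))).map
        (fun k => (k, (2 : Int))) := by
  simp only [two_by_two, if_neg hne]
  have hcont : ∀ p ∈ (PySem.Dict.counter animals).items,
      (PySem.Dict.counter animals).contains p.1 = true := by
    intro p hp
    exact (PySem.Dict.contains_iff_mem_keys _ _).2 (PySem.Dict.mem_keys_of_mem_items _ hp)
  rw [capFold_items _ _ hcont, PySem.Dict.items_counter, List.map_map, List.filter_map]
  -- the capped value attached to a distinct animal k
  have hany : ∀ k ∈ PySem.Set.ofList animals,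
      (((PySem.Set.ofList animals).map (fun k => (k, (animals.count k : Int)))).any
        (fun q => q.1 == k && decide (3 ≤ q.2))) = decide (3 ≤ animals.count k) := by
    intro k hk
    rw [List.any_map]
    rcases Nat.lt_or_ge (animals.count k) 3 with h3 | h3
    · have : decide (3 ≤ animals.count k) = false := by simp; omega
      rw [this, List.any_eq_false]
      intro k' hk'
      simp only [Function.comp, Bool.and_eq_true, beq_iff_eq, decide_eq_true_eq, not_and]
      rintro rfl h'
      omega
    · have : decide (3 ≤ animals.count k) = true := by simp [h3]
      rw [this, List.any_eq_true]
      refine ⟨k, hk, ?_⟩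
      simp only [Function.comp]
      rw [Bool.and_eq_true]
      refine ⟨by simp, by simp; omega⟩
  rw [List.filter_congr (q := fun k => decide (2 ≤ animals.count k)) ?_]
  · apply List.map_congr_left
    intro k hk
    have hk2 : 2 ≤ animals.count k := by
      have := List.of_mem_filter hk
      simpa using this
    have hkm : k ∈ PySem.Set.ofList animals := List.mem_of_mem_filter hk
    simp only [Function.comp, hany k hkm]
    rcases Nat.lt_or_ge (animals.count k) 3 with h3 | h3
    · have hd : decide (3 ≤ animals.count k) = false := by simp; omega
      have hc2 : animals.count k = 2 := by omega
      simp [hc2]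
    · have hd : decide (3 ≤ animals.count k) = true := by simp [h3]
      simp [hd]
  · intro k hk
    simp only [Function.comp, hany k hk]
    rcases Nat.lt_or_ge (animals.count k) 3 with h3 | h3
    · have hd : decide (3 ≤ animals.count k) = false := by simp; omega
      rw [hd]
      simp only [Bool.false_eq_true, if_false]
      rw [Bool.eq_iff_iff]
      simp only [beq_iff_eq, decide_eq_true_eq]
      constructor
      · intro h; omega
      · intro h; omega
    · have hd : decide (3 ≤ animals.count k) = true := by simp [h3]
      rw [hd]
      simp only [if_true]
      rw [Bool.eq_iff_iff]
      simp only [beq_iff_eq, decide_eq_true_eq]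
      constructor
      · intro _; omega
      · intro _; trivial

-- B's comprehension: filtering enumerate(l) to first occurrences (index?(l,a) = i) satisfying q
-- and projecting the elements gives exactly set(l)'s element list filtered by q.
theorem b_filter_enumerate (q : String → Bool) (l : List String) :
    (((PySem.List.enumerate l 0).filter
        (fun p => ((PySem.List.index? l p.2).map (fun k => (k : Int)) == some p.1) && q p.2)).map
      (fun p => p.2)) = (PySem.Set.ofList l).filter q := by
  induction l using List.reverseRecOn with
  | nil => simp [PySem.List.enumerate_nil, PySem.Set.ofList]
  | append_singleton xs x ih =>
    rw [PySem.List.enumerate_append, List.filter_append, List.map_append]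
    have hpre :
        ((PySem.List.enumerate xs 0).filter
          (fun p => ((PySem.List.index? (xs ++ [x]) p.2).map (fun k => (k : Int)) == some p.1) && q p.2)) =
        ((PySem.List.enumerate xs 0).filter
          (fun p => ((PySem.List.index? xs p.2).map (fun k => (k : Int)) == some p.1) && q p.2)) := by
      apply List.filter_congr
      intro p hp
      obtain ⟨k, hk, rfl⟩ := (PySem.List.mem_enumerate_iff _ _ _).1 hp
      rw [PySem.List.index?_append_of_mem _ (List.getElem_mem hk)]
    rw [hpre, ih]
    by_cases hx : x ∈ xs
    · -- x already occurred: appended element filtered out, set unchanged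
      have hidx : ∃ j, PySem.List.index? (xs ++ [x]) x = some j ∧ j < xs.length := by
        obtain ⟨j, hj⟩ := Option.isSome_iff_exists.1 ((PySem.List.index?_isSome_iff xs x).2 hx)
        obtain ⟨hjlt, -⟩ := PySem.List.getElem_of_index?_eq_some hj
        exact ⟨j, by rw [PySem.List.index?_append_of_mem _ hx, hj], hjlt⟩
      obtain ⟨j, hj, hjlt⟩ := hidx
      simp only [PySem.List.index?_eq_idxOf?] at hj
      rw [PySem.Set.ofList_append_singleton, PySem.Set.add_of_mem ((PySem.Set.mem_ofList xs x).2 hx)]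
      simp [PySem.List.enumerate_cons, PySem.List.enumerate_nil, hj]
      intro h
      exfalso
      omega
    · -- first occurrence of x at position xs.length: kept iff q x; set gains x at the end
      have hj : List.idxOf? x (xs ++ [x]) = some xs.length := by
        rw [← PySem.List.index?_eq_idxOf?]
        exact PySem.List.index?_append_singleton_self _ _ hx
      rw [PySem.Set.ofList_append_singleton,
        PySem.Set.add_of_not_mem (fun hm => hx ((PySem.Set.mem_ofList xs x).1 hm)),
        List.filter_append]
      by_cases hq : q x <;>
        simp [PySem.List.enumerate_cons, PySem.List.enumerate_nil, hj, hq]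
-- ===== VERDICT (by name: the statement is the Claim_ definition above) =====
theorem two_by_two_spec : Claim_equal_two_by_two := by
  intro animals _ hpre
  unfold Spec_two_by_two
  rw [two_by_two_char animals hpre]
  unfold two_by_two_alt
  rw [← b_filter_enumerate (fun a => decide (2 ≤ animals.count a)) animals, List.map_map]
  rfl
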